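-- pv_equiv track=rewrite | github.com/BrentRector/orchard | scripts/woz_deep.py | to_nibbles_v2
-- ===== SOURCE A (Python) =====
-- def to_nibbles_v2(track_data, bit_count):
--     """Convert track data to nibbles."""
--     bits = []
--     for b in track_data:
--         for i in range(7, -1, -1):
--             bits.append((b >> i) & 1)
--             if len(bits) >= bit_count:
--                 break
--         if len(bits) >= bit_count:
--             break
--     nibbles = []
--     current = 0
--     for b in bits:
--         current = ((current << 1) | b) & 0xFF
--         if current & 0x80:
--             nibbles.append(current)
--             current = 0
--     return nibbles
-- ===== SOURCE B (Python) =====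
-- def to_nibbles_v2(track_data, bit_count):
--     """Convert track data to nibbles (single fused pass, no intermediate bit list)."""
--     nibbles = []
--     current = 0
--     n = 0
--     done = False
--     for b in track_data:
--         for i in range(7, -1, -1):
--             current = ((current << 1) | ((b >> i) & 1)) & 0xFF
--             if current & 0x80:
--                 nibbles.append(current)
--                 current = 0
--             n += 1
--             if n >= bit_count:
--                 done = True
--                 break
--         if done:
--             break
--     return nibbles
-- ===== Notes on version B (the rewrite author's own statement) =====
-- stated objective: simpler
-- what changed: B fuses A's two passes into one: instead of materializing the full intermediate bit list and then folding it into nibbles, B maintains the shift register and a bit counter directly while scanning the bytes, never building the bit list.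
import Mathlib
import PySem

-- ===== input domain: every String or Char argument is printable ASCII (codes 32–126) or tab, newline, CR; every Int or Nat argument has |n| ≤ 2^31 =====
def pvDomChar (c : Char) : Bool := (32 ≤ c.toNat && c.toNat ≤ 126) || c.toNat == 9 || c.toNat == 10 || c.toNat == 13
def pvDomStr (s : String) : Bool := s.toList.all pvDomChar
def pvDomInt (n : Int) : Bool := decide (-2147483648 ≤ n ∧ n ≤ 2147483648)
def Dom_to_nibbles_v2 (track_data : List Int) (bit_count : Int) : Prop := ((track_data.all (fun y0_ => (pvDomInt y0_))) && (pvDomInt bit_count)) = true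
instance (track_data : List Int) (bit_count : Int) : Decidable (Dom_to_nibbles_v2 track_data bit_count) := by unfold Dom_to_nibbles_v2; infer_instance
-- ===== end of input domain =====

-- B fuses A's two passes (bit list, then packing fold) into one scan with a shift register
-- and a bit counter; same return value, no intermediate bit list. Objective: simpler/alternative.

-- ===== PORT A =====
-- inner loop `for i in range(7,-1,-1): bits.append((b>>i)&1); if len(bits)>=bit_count: break`
def pvA_inner (b bit_count : Int) : List Int → List Int → List Int
  | bits, [] => bits
  | bits, i :: is =>
    let bits := bits ++ [PySem.Int.band (b >>> i.toNat) 1]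
    if bit_count ≤ (bits.length : Int) then bits
    else pvA_inner b bit_count bits is

-- outer loop building `bits`, with the `if len(bits) >= bit_count: break`
def pvA_bits (bit_count : Int) : List Int → List Int → List Int
  | bits, [] => bits
  | bits, b :: rest =>
    let bits := pvA_inner b bit_count bits (PySem.List.pyRange 7 (-1) (-1))
    if bit_count ≤ (bits.length : Int) then bits
    else pvA_bits bit_count bits rest

-- one step of A's second loop: `current = ((current<<1)|b)&0xFF; if current&0x80: append; current=0`
def pvA_pack (st : List Int × Int) (b : Int) : List Int × Int :=
  let current := PySem.Int.band (PySem.Int.bor (st.2 <<< 1) b) 0xFF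
  if PySem.Int.band current 0x80 ≠ 0 then (st.1 ++ [current], 0) else (st.1, current)

def to_nibbles_v2 (track_data : List Int) (bit_count : Int) : List Int :=
  let bits := pvA_bits bit_count [] track_data
  (bits.foldl pvA_pack ([], 0)).1

-- ===== PORT B =====
-- state = (nibbles, current, n); Bool result = the `done` flag
def pvB_inner (b bit_count : Int) : List Int × Int × Int → List Int → (List Int × Int × Int) × Bool
  | st, [] => (st, false)
  | (nibbles, current, n), i :: is =>
    let current := PySem.Int.band (PySem.Int.bor (current <<< 1) (PySem.Int.band (b >>> i.toNat) 1)) 0xFF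
    let st : List Int × Int :=
      if PySem.Int.band current 0x80 ≠ 0 then (nibbles ++ [current], 0) else (nibbles, current)
    let n := n + 1
    if bit_count ≤ n then ((st.1, st.2, n), true)
    else pvB_inner b bit_count (st.1, st.2, n) is

def pvB_outer (bit_count : Int) : List Int × Int × Int → List Int → List Int × Int × Int
  | st, [] => st
  | st, b :: rest =>
    let r := pvB_inner b bit_count st (PySem.List.pyRange 7 (-1) (-1))
    if r.2 then r.1 else pvB_outer bit_count r.1 rest

def to_nibbles_v2_alt (track_data : List Int) (bit_count : Int) : List Int :=
  (pvB_outer bit_count ([], 0, 0) track_data).1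

-- ===== PRECONDITION & SPEC =====
def Spec_to_nibbles_v2 (track_data : List Int) (bit_count : Int) (out : List Int) : Prop := out = to_nibbles_v2_alt track_data bit_count
instance (track_data : List Int) (bit_count : Int) (out : List Int) : Decidable (Spec_to_nibbles_v2 track_data bit_count out) := by unfold Spec_to_nibbles_v2; infer_instance

-- ===== CLAIM (what is proved, stated in full; the proofs are below) =====
def Claim_equal_to_nibbles_v2 : Prop := ∀ (track_data : List Int) (bit_count : Int), Dom_to_nibbles_v2 track_data bit_count → Spec_to_nibbles_v2 track_data bit_count (to_nibbles_v2 track_data bit_count)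

-- ===== LEMMAS AND PROOFS =====

-- B's state corresponding to A's accumulated bit list
def pvStOf (bits : List Int) : List Int × Int × Int :=
  ((bits.foldl pvA_pack ([], 0)).1, (bits.foldl pvA_pack ([], 0)).2, (bits.length : Int))

lemma pv_inner_sim (b bit_count : Int) :
    ∀ (is bits : List Int), (is = [] → ¬ bit_count ≤ (bits.length : Int)) →
    pvB_inner b bit_count (pvStOf bits) is
      = (pvStOf (pvA_inner b bit_count bits is),
         decide (bit_count ≤ ((pvA_inner b bit_count bits is).length : Int))) := by
  intro is
  induction is with
  | nil =>
      intro bits h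
      simp [pvB_inner, pvA_inner, h rfl]
  | cons i is ih =>
      intro bits _
      have hfold : List.foldl pvA_pack ([], 0) (bits ++ [PySem.Int.band (b >>> i.toNat) 1])
          = pvA_pack (List.foldl pvA_pack ([], 0) bits) (PySem.Int.band (b >>> i.toNat) 1) := by
        simp [List.foldl_append]
      have hst : pvStOf (bits ++ [PySem.Int.band (b >>> i.toNat) 1])
          = ((pvA_pack (List.foldl pvA_pack ([], 0) bits) (PySem.Int.band (b >>> i.toNat) 1)).1,
             (pvA_pack (List.foldl pvA_pack ([], 0) bits) (PySem.Int.band (b >>> i.toNat) 1)).2,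
             (bits.length : Int) + 1) := by
        simp [pvStOf, hfold]
      have hB : pvB_inner b bit_count (pvStOf bits) (i :: is)
          = if bit_count ≤ (bits.length : Int) + 1
            then (((pvA_pack (List.foldl pvA_pack ([], 0) bits) (PySem.Int.band (b >>> i.toNat) 1)).1,
                   (pvA_pack (List.foldl pvA_pack ([], 0) bits) (PySem.Int.band (b >>> i.toNat) 1)).2,
                   (bits.length : Int) + 1), true)
            else pvB_inner b bit_count
                  ((pvA_pack (List.foldl pvA_pack ([], 0) bits) (PySem.Int.band (b >>> i.toNat) 1)).1,
                   (pvA_pack (List.foldl pvA_pack ([], 0) bits) (PySem.Int.band (b >>> i.toNat) 1)).2,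
                   (bits.length : Int) + 1) is := rfl
      have hA : pvA_inner b bit_count bits (i :: is)
          = if bit_count ≤ ((bits ++ [PySem.Int.band (b >>> i.toNat) 1]).length : Int)
            then bits ++ [PySem.Int.band (b >>> i.toNat) 1]
            else pvA_inner b bit_count (bits ++ [PySem.Int.band (b >>> i.toNat) 1]) is := rfl
      have hlen : (((bits ++ [PySem.Int.band (b >>> i.toNat) 1]).length : Int))
          = (bits.length : Int) + 1 := by simp
      rw [hB, hA, hlen]
      by_cases hbr : bit_count ≤ (bits.length : Int) + 1
      · simp [hbr, hst]
      · have h' : is = [] → ¬ bit_count ≤ (((bits ++ [PySem.Int.band (b >>> i.toNat) 1]).length : Int)) := by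
          intro _; rw [hlen]; exact hbr
        have hrec := ih (bits ++ [PySem.Int.band (b >>> i.toNat) 1]) h'
        rw [hst] at hrec
        simp [hbr, hrec]

lemma pv_range_ne : PySem.List.pyRange 7 (-1) (-1) ≠ [] := by decide

lemma pv_outer_sim (bit_count : Int) :
    ∀ (td bits : List Int),
    pvB_outer bit_count (pvStOf bits) td = pvStOf (pvA_bits bit_count bits td) := by
  intro td
  induction td with
  | nil => intro bits; simp [pvB_outer, pvA_bits]
  | cons b rest ih =>
      intro bits
      have hsim := pv_inner_sim b bit_count (PySem.List.pyRange 7 (-1) (-1)) bits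
        (fun h => absurd h pv_range_ne)
      by_cases hbr : bit_count ≤ ((pvA_inner b bit_count bits (PySem.List.pyRange 7 (-1) (-1))).length : Int)
      · simp [pvB_outer, pvA_bits, hsim, hbr]
      · simp [pvB_outer, pvA_bits, hsim, hbr, ih]

-- ===== VERDICT (by name: the statement is the Claim_ definition above) =====
theorem to_nibbles_v2_spec : Claim_equal_to_nibbles_v2 := by
  intro track_data bit_count _
  show to_nibbles_v2 track_data bit_count = to_nibbles_v2_alt track_data bit_count
  have h := pv_outer_sim bit_count track_data []
  have h0 : pvStOf [] = ([], 0, 0) := rfl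
  rw [h0] at h
  simp [to_nibbles_v2, to_nibbles_v2_alt, h, pvStOf]
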